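-- pv_equiv track=rewrite | github.com/algorithmFor2021/dain_song | 문자열/BOJ-5430.py | operateAC
-- ===== SOURCE A (Python) =====
-- def operateAC(p_list, n, nums):
--     is_reverse = False
--     for p in p_list:
--         if p == 'R':
--             is_reverse = not is_reverse
--         elif p == 'D':
--             if is_reverse:
--                 nums.pop()
--             else:
--                 nums.pop(0)
--     if is_reverse:
--         nums.reverse()
--     return "[{}]".format(','.join(nums))
-- ===== SOURCE B (Python) =====
-- def operateAC(p_list, n, nums):
--     # count deletions at each end with two pointers, slice once at the end
--     lo, hi = 0, len(nums)
--     rev = False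
--     for p in p_list:
--         if p == 'R':
--             rev = not rev
--         elif p == 'D':
--             if rev:
--                 hi -= 1
--             else:
--                 lo += 1
--     res = nums[lo:hi]
--     if rev:
--         res.reverse()
--     return "[{}]".format(','.join(res))
-- ===== Notes on version B (the rewrite author's own statement) =====
-- stated objective: alternative
-- what changed: B never mutates the list: instead of A's per-'D' pop(0)/pop(), it counts deletions at each end with two index pointers and takes a single slice at the end.
import Mathlib
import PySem

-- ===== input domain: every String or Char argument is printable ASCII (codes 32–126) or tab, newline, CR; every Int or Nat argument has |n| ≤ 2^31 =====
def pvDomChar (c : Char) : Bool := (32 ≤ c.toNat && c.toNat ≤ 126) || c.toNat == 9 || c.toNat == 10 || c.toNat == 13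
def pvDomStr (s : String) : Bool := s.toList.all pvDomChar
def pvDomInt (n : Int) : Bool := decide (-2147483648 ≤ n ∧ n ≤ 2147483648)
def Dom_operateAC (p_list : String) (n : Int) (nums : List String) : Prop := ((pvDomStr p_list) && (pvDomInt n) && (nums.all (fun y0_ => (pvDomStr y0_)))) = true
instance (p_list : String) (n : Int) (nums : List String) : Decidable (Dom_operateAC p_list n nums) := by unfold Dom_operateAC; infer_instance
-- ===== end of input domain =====

-- B replaces A's per-'D' pop(0)/pop() with two index pointers and one final slice;
-- A mutates `nums` in place (pops, reverse) — the claim is about the RETURN value only, B does not mutate.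

-- ===== PORT A =====
-- step of A's loop; `none` = IndexError already occurred
def stepA (st : Option (Bool × List String)) (p : Char) : Option (Bool × List String) :=
  match st with
  | none => none
  | some (rev, xs) =>
    if p = 'R' then some (!rev, xs)
    else if p = 'D' then
      if rev then
        match PySem.List.pop? xs (-1) with     -- nums.pop()
        | none => none
        | some (_, ys) => some (rev, ys)
      else
        match PySem.List.pop? xs 0 with        -- nums.pop(0)
        | none => none
        | some (_, ys) => some (rev, ys)
    else some (rev, xs)

def operateAC (p_list : String) (n : Int) (nums : List String) : String :=
  match p_list.toList.foldl stepA (some (false, nums)) with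
  | none => ""      -- IndexError (excluded by Pre_)
  | some (rev, xs) =>
    "[" ++ PySem.Str.join "," (if rev then xs.reverse else xs) ++ "]"

-- ===== PORT B =====
-- step of B's loop over (lo, hi, rev)
def stepB (st : Int × Int × Bool) (p : Char) : Int × Int × Bool :=
  let (lo, hi, rev) := st
  if p = 'R' then (lo, hi, !rev)
  else if p = 'D' then (if rev then (lo, hi - 1, rev) else (lo + 1, hi, rev))
  else st

def operateAC_alt (p_list : String) (n : Int) (nums : List String) : String :=
  let st := p_list.toList.foldl stepB (0, (nums.length : Int), false)
  let res := PySem.List.slice nums (some st.1) (some st.2.1)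
  "[" ++ PySem.Str.join "," (if st.2.2 then res.reverse else res) ++ "]"

-- ===== PRECONDITION & SPEC =====
-- Pre_ excludes exactly the inputs where A raises IndexError: more 'D' operations than elements.
def Pre_operateAC (p_list : String) (n : Int) (nums : List String) : Prop :=
  p_list.toList.count 'D' ≤ nums.length
instance (p_list : String) (n : Int) (nums : List String) : Decidable (Pre_operateAC p_list n nums) := by unfold Pre_operateAC; infer_instance

def pvWitness_operateAC : String × Int × List String := ("RDRD", 0, ["1", "2", "3"])

def Spec_operateAC (p_list : String) (n : Int) (nums : List String) (out : String) : Prop := out = operateAC_alt p_list n nums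
instance (p_list : String) (n : Int) (nums : List String) (out : String) : Decidable (Spec_operateAC p_list n nums out) := by unfold Spec_operateAC; infer_instance

-- ===== CLAIM (what is proved, stated in full; the proofs are below) =====
def Claim_equal_operateAC : Prop := ∀ (p_list : String) (n : Int) (nums : List String), Dom_operateAC p_list n nums → Pre_operateAC p_list n nums → Spec_operateAC p_list n nums (operateAC p_list n nums)
-- ===== LEMMAS AND PROOFS =====
-- number of deletions taken from the front / from the back, and the final reverse flag,
-- as functions of the operation characters and the incoming flag
def aD : List Char → Bool → Nat
  | [], _ => 0
  | c :: t, rev =>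
    if c = 'R' then aD t (!rev)
    else if c = 'D' then (if rev then aD t rev else aD t rev + 1)
    else aD t rev

def bD : List Char → Bool → Nat
  | [], _ => 0
  | c :: t, rev =>
    if c = 'R' then bD t (!rev)
    else if c = 'D' then (if rev then bD t rev + 1 else bD t rev)
    else bD t rev

def rR : List Char → Bool → Bool
  | [], rev => rev
  | c :: t, rev => if c = 'R' then rR t (!rev) else rR t rev

theorem aD_add_bD (cs : List Char) (rev : Bool) : aD cs rev + bD cs rev = cs.count 'D' := by
  induction cs generalizing rev with
  | nil => simp [aD, bD]
  | cons c t ih =>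
    rcases eq_or_ne c 'R' with hR | hR
    · subst hR
      have hc : List.count 'D' ('R' :: t) = List.count 'D' t := by simp
      simp [aD, bD, hc, ih]
    · rcases eq_or_ne c 'D' with hD | hD
      · subst hD
        have hA : aD ('D' :: t) rev = (if rev then aD t rev else aD t rev + 1) := by
          cases rev <;> simp [aD]
        have hB : bD ('D' :: t) rev = (if rev then bD t rev + 1 else bD t rev) := by
          cases rev <;> simp [bD]
        have hc : List.count 'D' ('D' :: t) = List.count 'D' t + 1 := by simp
        have h1 := ih rev
        rw [hA, hB, hc]
        cases rev <;> simp <;> omega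
      · have hc : List.count 'D' (c :: t) = List.count 'D' t := by
          simp [List.count_cons, hD]
        simp [aD, bD, hR, hD, hc, ih]

theorem foldlB_char (cs : List Char) (lo hi : Int) (rev : Bool) :
    cs.foldl stepB (lo, hi, rev) = (lo + aD cs rev, hi - bD cs rev, rR cs rev) := by
  induction cs generalizing lo hi rev with
  | nil => simp [aD, bD, rR]
  | cons c t ih =>
    by_cases hR : c = 'R' <;> by_cases hD : c = 'D'
    · simp [hR] at hD
    · simp [List.foldl_cons, stepB, hR, aD, bD, rR, ih]
    · cases rev <;>
        simp [List.foldl_cons, stepB, hR, hD, aD, bD, rR, ih] <;> ring_nf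
    · simp [List.foldl_cons, stepB, hR, hD, aD, bD, rR, ih]

theorem foldlA_char (cs : List Char) (nums : List String) (rev : Bool)
    (h : cs.count 'D' ≤ nums.length) :
    cs.foldl stepA (some (rev, nums)) =
      some (rR cs rev, (nums.drop (aD cs rev)).take (nums.length - aD cs rev - bD cs rev)) := by
  induction cs generalizing nums rev with
  | nil => simp [aD, bD, rR]
  | cons c t ih =>
    by_cases hR : c = 'R' <;> by_cases hD : c = 'D'
    · simp [hR] at hD
    · -- 'R'
      have h' : t.count 'D' ≤ nums.length := by
        simp [List.count_cons, hD] at h; omega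
      simp [List.foldl_cons, stepA, hR, aD, bD, rR, ih _ _ h']
    · -- 'D'
      have hcnt : t.count 'D' + 1 ≤ nums.length := by
        simp [List.count_cons, hD] at h; omega
      have hne : nums ≠ [] := by
        intro hnil; rw [hnil] at hcnt; simp at hcnt
      subst hD
      cases rev with
      | false =>
        obtain ⟨y, ys, rfl⟩ := List.exists_cons_of_ne_nil hne
        have h' : t.count 'D' ≤ ys.length := by simp at hcnt ⊢; omega
        simp [List.foldl_cons, stepA, PySem.List.pop?_zero_cons, aD, bD, rR, ih _ _ h']
      | true =>
        have hpop : PySem.List.pop? nums (-1) = some (nums.getLast hne, nums.dropLast) := by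
          conv_lhs => rw [← List.dropLast_append_getLast hne]
          exact PySem.List.pop?_last _ _
        have hlen : nums.dropLast.length = nums.length - 1 := by simp
        have h' : t.count 'D' ≤ nums.dropLast.length := by rw [hlen]; omega
        have hIH := ih nums.dropLast true h'
        have hdt : ∀ (a k : Nat), k ≤ nums.length - 1 - a →
            (nums.dropLast.drop a).take k = (nums.drop a).take k := by
          intro a k hk
          rw [List.dropLast_eq_take, List.drop_take, List.take_take]
          congr 1
          omega
        have hstep : stepA (some (true, nums)) 'D' = some (true, nums.dropLast) := by
          simp [stepA, hpop]
        rw [List.foldl_cons, hstep, hIH]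
        have haD : aD ('D' :: t) true = aD t true := by simp [aD]
        have hbD : bD ('D' :: t) true = bD t true + 1 := by simp [bD]
        have hrR : rR ('D' :: t) true = rR t true := by simp [rR]
        rw [haD, hbD, hrR]
        have hab : aD t true + bD t true ≤ nums.length - 1 := by
          have := aD_add_bD t true; omega
        rw [hlen, hdt (aD t true) (nums.length - 1 - aD t true - bD t true) (by omega)]
        have hk : nums.length - 1 - aD t true - bD t true
            = nums.length - aD t true - (bD t true + 1) := by omega
        rw [hk]
    · -- other char
      have h' : t.count 'D' ≤ nums.length := by
        simp [List.count_cons, hD] at h; omega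
      simp [List.foldl_cons, stepA, hR, hD, aD, bD, rR, ih _ _ h']

theorem slice_eq (nums : List String) (a b : Nat) (hab : a + b ≤ nums.length) :
    PySem.List.slice nums (some ((0 : Int) + (a : Int))) (some ((nums.length : Int) - (b : Int))) =
      (nums.drop a).take (nums.length - a - b) := by
  have hb : (nums.length : Int) - (b : Int) = ((nums.length - b : Nat) : Int) := by
    push_cast; omega
  rw [zero_add, hb, PySem.List.slice_natCast]
  congr 1
  omega

-- ===== VERDICT (by name: the statement is the Claim_ definition above) =====
theorem operateAC_spec : Claim_equal_operateAC := by
  intro p_list n nums _ hpre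
  unfold Spec_operateAC operateAC operateAC_alt
  rw [foldlA_char _ _ _ hpre, foldlB_char]
  have hab : aD p_list.toList false + bD p_list.toList false ≤ nums.length := by
    have := aD_add_bD p_list.toList false
    unfold Pre_operateAC at hpre; omega
  simp only [slice_eq nums _ _ hab]
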